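-- pv_equiv track=rewrite | github.com/nikatchitadze22/GOA_homework | day 0134/classwork/ex1.py | comfortable_word
-- ===== SOURCE A (Python) =====
-- def comfortable_word(word):
--     l = "qwertasdfgzxcvb"
--     r = "yuiophjklnm"
--     h = None
--
--     for c in word:
--         if c in l:
--             if h == "l":
--                 return False
--             h = "l"
--         elif c in r:
--             if h == "r":
--                 return False
--             h = "r"
--         else:
--             return False
--
--     return True
-- ===== SOURCE B (Python) =====
-- def comfortable_word(word):
--     l = "qwertasdfgzxcvb"
--     r = "yuiophjklnm"
--     labels = ['l' if c in l else 'r' if c in r else None for c in word]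
--     if None in labels:
--         return False
--     return all(a != b for a, b in zip(labels, labels[1:]))
-- ===== Notes on version B (the rewrite author's own statement) =====
-- stated objective: simpler
-- what changed: Replaces the running hand-state loop with early returns by a two-phase build-then-compare: map every char to a hand label, reject if any is unassigned, then check all adjacent label pairs differ.
import Mathlib
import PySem

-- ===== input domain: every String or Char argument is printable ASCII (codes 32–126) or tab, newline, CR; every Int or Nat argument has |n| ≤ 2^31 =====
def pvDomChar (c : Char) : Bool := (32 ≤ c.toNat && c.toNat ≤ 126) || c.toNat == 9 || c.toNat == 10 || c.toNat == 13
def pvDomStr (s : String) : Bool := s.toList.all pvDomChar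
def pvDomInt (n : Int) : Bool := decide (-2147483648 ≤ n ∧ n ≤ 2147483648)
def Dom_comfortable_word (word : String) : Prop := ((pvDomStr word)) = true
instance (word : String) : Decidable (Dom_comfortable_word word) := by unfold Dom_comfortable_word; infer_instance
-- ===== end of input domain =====

-- B replaces A's running hand-state loop (early returns) by a two-phase build-then-compare:
-- map each character to a hand label, reject unassigned characters, then check adjacent labels differ. Objective: simpler.


-- ===== PORT A =====
-- 'c in l' on a single char equals char membership in the string's characters (exact here since c is one char)
def pvLeft : List Char := "qwertasdfgzxcvb".toList
def pvRight : List Char := "yuiophjklnm".toList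

-- A's loop: state h is the hand of the previous character (None initially), early return False → false
def pvALoop : List Char → Option String → Bool
  | [], _ => true
  | c :: cs, h =>
    if pvLeft.contains c then
      if h == some "l" then false else pvALoop cs (some "l")
    else if pvRight.contains c then
      if h == some "r" then false else pvALoop cs (some "r")
    else false

def comfortable_word (word : String) : Bool :=
  pvALoop word.toList none

-- ===== PORT B =====
def pvLabel (c : Char) : Option String :=
  if pvLeft.contains c then some "l" else if pvRight.contains c then some "r" else none

def comfortable_word_alt (word : String) : Bool :=
  let labels := word.toList.map pvLabel
  if labels.contains none then false
  else (labels.zip labels.tail).all (fun p => p.1 != p.2)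

-- ===== PRECONDITION & SPEC =====
def Spec_comfortable_word (word : String) (out : Bool) : Prop := out = comfortable_word_alt word
instance (word : String) (out : Bool) : Decidable (Spec_comfortable_word word out) := by unfold Spec_comfortable_word; infer_instance

-- ===== CLAIM (what is proved, stated in full; the proofs are below) =====
def Claim_equal_comfortable_word : Prop := ∀ (word : String), Dom_comfortable_word word → Spec_comfortable_word word (comfortable_word word)

-- ===== LEMMAS AND PROOFS =====

-- reference chain check: every label differs from the previous one, starting from h
def pvAdjFrom : Option String → List (Option String) → Bool
  | _, [] => true
  | h, x :: xs => (x != h) && pvAdjFrom x xs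

def pvAllZip (ls : List (Option String)) : Bool :=
  (ls.zip ls.tail).all (fun p => p.1 != p.2)

theorem pvALoop_eq (cs : List Char) : ∀ h : Option String,
    pvALoop cs h = (!(cs.map pvLabel).contains none && pvAdjFrom h (cs.map pvLabel)) := by
  induction cs with
  | nil => intro h; simp [pvALoop, pvAdjFrom]
  | cons c cs ih =>
    intro h
    by_cases hl : c ∈ pvLeft
    · by_cases hh : h = some "l"
      · simp [pvALoop, hh, pvLabel, pvAdjFrom, hl]
      · have hne : ((some "l" : Option String) == h) = false :=
          beq_eq_false_iff_ne.mpr (fun he => hh he.symm)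
        simp [pvALoop, hh, pvLabel, pvAdjFrom, hl, ih, bne, hne]
    · by_cases hr : c ∈ pvRight
      · by_cases hh : h = some "r"
        · simp [pvALoop, hh, pvLabel, pvAdjFrom, hl, hr]
        · have hne : ((some "r" : Option String) == h) = false :=
            beq_eq_false_iff_ne.mpr (fun he => hh he.symm)
          simp [pvALoop, hh, pvLabel, pvAdjFrom, hl, hr, ih, bne, hne]
      · simp [pvALoop, pvLabel, pvAdjFrom, hl, hr]

theorem pvAdjFrom_cons (xs : List (Option String)) : ∀ y : Option String,
    pvAdjFrom y xs = pvAllZip (y :: xs) := by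
  induction xs with
  | nil => intro y; simp [pvAdjFrom, pvAllZip]
  | cons x xs ih =>
    intro y
    simp only [pvAdjFrom, ih x, pvAllZip, List.zip, List.tail, List.zipWith, List.all_cons]
    rw [bne_comm]

theorem comfortable_word_eq (word : String) : comfortable_word word = comfortable_word_alt word := by
  unfold comfortable_word comfortable_word_alt
  rw [pvALoop_eq]
  by_cases hn : (word.toList.map pvLabel).contains none = true
  · simp only [hn]
    simp
  · have hn' : (word.toList.map pvLabel).contains none = false := by
      exact Bool.eq_false_iff.mpr hn
    simp only [hn', Bool.not_false, Bool.true_and]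
    cases hls : word.toList.map pvLabel with
    | nil => simp [pvAdjFrom]
    | cons x xs =>
      rw [pvAdjFrom_cons]
      have hx : (x != none) = true := by
        rw [hls] at hn'
        cases x
        · simp at hn'
        · simp
      simp only [pvAllZip, List.zip, List.tail, List.zipWith, List.all_cons]
      rw [bne_comm, hx]
      simp

-- ===== VERDICT (by name: the statement is the Claim_ definition above) =====
theorem comfortable_word_spec : Claim_equal_comfortable_word := by
  intro word _
  exact comfortable_word_eq word
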